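-- pv_equiv track=rewrite | github.com/ladokp/aoc2023 | solution/aoc_day_01.py | _parse
-- ===== SOURCE A (Python) =====
-- def _parse(puzzle_input):
--     p1 = []
--     p2 = []
--     for line in puzzle_input.split("\n"):
--         p1_digits = []
--         p2_digits = []
--         for index, character in enumerate(line):
--             if character.isdigit():
--                 p1_digits.append(character)
--                 p2_digits.append(character)
--             for digit, value in enumerate(
--                 (
--                     "one",
--                     "two",
--                     "three",
--                     "four",
--                     "five",
--                     "six",
--                     "seven",
--                     "eight",
--                     "nine",
--                 )
--             ):
--                 if line[index:].startswith(value):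
--                     p2_digits.append(str(digit + 1))
--         p1.append(int(p1_digits[0] + p1_digits[-1]))
--         p2.append(int(p2_digits[0] + p2_digits[-1]))
--     return p1, p2
-- ===== SOURCE B (Python) =====
-- WORDS = ("one", "two", "three", "four", "five", "six", "seven", "eight", "nine")
--
--
-- def _token_at(line, index):
--     """Digit value of the token (digit char or spelled word) starting at index, else None."""
--     character = line[index]
--     if character.isdigit():
--         return ord(character) - 48
--     for digit, word in enumerate(WORDS):
--         if line.startswith(word, index):
--             return digit + 1
--     return None
--
--
-- def _parse(puzzle_input):
--     p1 = []
--     p2 = []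
--     for line in puzzle_input.split("\n"):
--         n = len(line)
--         first1 = next(ord(c) - 48 for c in line if c.isdigit())
--         last1 = next(ord(c) - 48 for c in reversed(line) if c.isdigit())
--         first2 = next(t for t in (_token_at(line, i) for i in range(n)) if t is not None)
--         last2 = next(t for t in (_token_at(line, n - 1 - i) for i in range(n)) if t is not None)
--         p1.append(10 * first1 + last1)
--         p2.append(10 * first2 + last2)
--     return p1, p2
-- ===== Notes on version B (the rewrite author's own statement) =====
-- stated objective: alternative
-- what changed: A scans every index of each line collecting ALL digit/word tokens into two lists and then indexes [0]/[-1] and re-parses the concatenated characters with int(); B never builds per-line lists: it runs four early-exiting searches (first digit left-to-right, last digit over reversed(line), first token left-to-right, last token scanning start positions right-to-left) and combines the two scalars arithmetically as 10*first+last.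
import Mathlib
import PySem

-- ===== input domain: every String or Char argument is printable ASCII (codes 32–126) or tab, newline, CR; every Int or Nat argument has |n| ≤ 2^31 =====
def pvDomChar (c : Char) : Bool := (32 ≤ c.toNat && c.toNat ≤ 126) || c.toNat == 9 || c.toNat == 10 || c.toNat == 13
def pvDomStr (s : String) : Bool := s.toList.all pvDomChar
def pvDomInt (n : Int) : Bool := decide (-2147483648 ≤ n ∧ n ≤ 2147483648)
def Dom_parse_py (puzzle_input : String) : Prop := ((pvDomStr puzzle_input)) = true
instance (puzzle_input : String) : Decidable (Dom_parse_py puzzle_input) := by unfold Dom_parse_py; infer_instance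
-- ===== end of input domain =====

-- B replaces A's collect-every-token-then-index-[0]/[-1]-and-reparse-with-int() per line by four
-- early-exiting searches (first/last digit from the two ends, first/last token left-to-right and
-- right-to-left) combined as 10*first+last (objective: alternative; no per-line list building).

-- ===== PORT A =====
-- the spelled-out digit words, shared literal ("one".toList, …)
def pvWords : List (List Char) :=
  [['o','n','e'], ['t','w','o'], ['t','h','r','e','e'], ['f','o','u','r'], ['f','i','v','e'],
   ['s','i','x'], ['s','e','v','e','n'], ['e','i','g','h','t'], ['n','i','n','e']]

-- body of A's `for index, character in enumerate(line)` loop (the inner word loop appends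
-- only to p2_digits, so it folds over st.2)
def pvStepA (cs : List Char) (st : List (List Char) × List (List Char)) (ic : Int × Char) :
    List (List Char) × List (List Char) :=
  let st1 := if PySem.Chars.isdigit ic.2 then (st.1 ++ [[ic.2]], st.2 ++ [[ic.2]]) else st
  (st1.1,
   (PySem.List.enumerate pvWords 0).foldl
     (fun d dv =>
       if PySem.Chars.startswith (PySem.Chars.slice cs (some ic.1) none) dv.2
       then d ++ [PySem.Int.toChars (dv.1 + 1)] else d)
     st1.2)

-- one iteration of A's line loop: build p1_digits/p2_digits, then int(d[0] + d[-1]) for each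
-- (pyGet? none / ofChars? none = the IndexError Pre_ excludes; .getD only discharges the Option)
def pvLineA (line : List Char) : Int × Int :=
  let st := (PySem.List.enumerate line 0).foldl (pvStepA line) ([], [])
  ((PySem.Int.ofChars? ((PySem.List.pyGet? st.1 0).getD [] ++ (PySem.List.pyGet? st.1 (-1)).getD [])).getD 0,
   (PySem.Int.ofChars? ((PySem.List.pyGet? st.2 0).getD [] ++ (PySem.List.pyGet? st.2 (-1)).getD [])).getD 0)

def parse_py (puzzle_input : String) : List Int × List Int :=
  ((PySem.Str.split? puzzle_input "\n").getD []).foldl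
    (fun acc line =>
      (acc.1 ++ [(pvLineA line.toList).1], acc.2 ++ [(pvLineA line.toList).2]))
    ([], [])

-- ===== PORT B =====
-- B's _token_at: digit char value at `index`, else the first spelled word starting there
-- (`line.startswith(word, index)` = startswith on line.drop index.toNat — exact: B only calls
-- it with 0 ≤ index < len; the `none` guard on pyGet? is totality only, never reached by B)
def pvTokenAt (line : List Char) (i : Int) : Option Int :=
  match PySem.List.pyGet? line i with
  | none => none
  | some c =>
    if PySem.Chars.isdigit c then some ((c.toNat : Int) - 48)
    else (PySem.List.enumerate pvWords 0).findSome?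
          (fun dv => if PySem.Chars.startswith (line.drop i.toNat) dv.2 then some (dv.1 + 1) else none)

-- `ord(c) - 48 for c in … if c.isdigit()` as one Option-valued step
def pvDigVal (c : Char) : Option Int :=
  if PySem.Chars.isdigit c then some ((c.toNat : Int) - 48) else none

-- B's four early-exit searches for one line; `next(...)` on an empty stream is the
-- StopIteration Pre_ excludes (.getD only discharges the Option)
def pvLineB (line : List Char) : Int × Int :=
  let n : Int := line.length
  let first1 := (line.findSome? pvDigVal).getD 0
  let last1 := (line.reverse.findSome? pvDigVal).getD 0
  let first2 := ((PySem.List.pyRange 0 n 1).findSome? (fun i => pvTokenAt line i)).getD 0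
  let last2 := ((PySem.List.pyRange 0 n 1).findSome? (fun i => pvTokenAt line (n - 1 - i))).getD 0
  (10 * first1 + last1, 10 * first2 + last2)

def parse_py_alt (puzzle_input : String) : List Int × List Int :=
  ((PySem.Str.split? puzzle_input "\n").getD []).foldl
    (fun acc line =>
      (acc.1 ++ [(pvLineB line.toList).1], acc.2 ++ [(pvLineB line.toList).2]))
    ([], [])

-- ===== PRECONDITION & SPEC =====
-- Pre_ excludes exactly the inputs with a line containing no ASCII digit: there A raises
-- IndexError on p1_digits[0] (and B's first next(...) raises StopIteration).
def Pre_parse_py (puzzle_input : String) : Prop :=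
  ∀ line ∈ (PySem.Str.split? puzzle_input "\n").getD [],
    line.toList.any PySem.Chars.isdigit = true
instance (puzzle_input : String) : Decidable (Pre_parse_py puzzle_input) := by
  unfold Pre_parse_py; infer_instance

def pvWitness_parse_py : String := "1"

def Spec_parse_py (puzzle_input : String) (out : List Int × List Int) : Prop := out = parse_py_alt puzzle_input
instance (puzzle_input : String) (out : List Int × List Int) : Decidable (Spec_parse_py puzzle_input out) := by unfold Spec_parse_py; infer_instance

-- ===== CLAIM (what is proved, stated in full; the proofs are below) =====
def Claim_equal_parse_py : Prop := ∀ (puzzle_input : String), Dom_parse_py puzzle_input → Pre_parse_py puzzle_input → Spec_parse_py puzzle_input (parse_py puzzle_input)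

-- ===== LEMMAS AND PROOFS =====

-- digit value of a collected single-character token
def pvChv (x : List Char) : Int := ((x.headD '0').toNat : Int) - 48
-- every token A collects is a single digit character
def pvGood (d : List (List Char)) : Prop :=
  ∀ x ∈ d, ∃ c, x = [c] ∧ PySem.Chars.isdigit c = true
-- the word tokens matching at the start of s, in word order
def pvMatched (s : List Char) : List (Int × List Char) :=
  (PySem.List.enumerate pvWords 0).filter (fun dv => PySem.Chars.startswith s dv.2)
-- the value stream of ALL tokens of a line, in start-position order
def pvToks (line : List Char) : List Int :=
  (List.range line.length).filterMap (fun j : Nat => pvTokenAt line (j : Int))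

theorem pvGood_append (d : List (List Char)) (c : Char) (hg : pvGood d)
    (hc : PySem.Chars.isdigit c = true) : pvGood (d ++ [[c]]) := by
  intro x hx
  rcases List.mem_append.1 hx with hx | hx
  · exact hg x hx
  · simp at hx; exact ⟨c, hx, hc⟩

-- every word token str(digit+1) is a single digit char of value digit+1
theorem pvWords_tokens :
    ∀ p ∈ PySem.List.enumerate pvWords 0,
      ∃ c, PySem.Int.toChars (p.1 + 1) = [c] ∧ PySem.Chars.isdigit c = true ∧ ((c.toNat : Int) - 48) = p.1 + 1 := by
  intro p hp
  fin_cases hp <;> exact ⟨_, rfl, by decide, by decide⟩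

-- no word starts with a digit character
theorem pvWords_head (p : Int × List Char) (hp : p ∈ PySem.List.enumerate pvWords 0)
    (c : Char) (t : List Char) (hs : PySem.Chars.startswith (c :: t) p.2 = true) :
    PySem.Chars.isdigit c = false := by
  rw [PySem.Chars.startswith_iff] at hs
  fin_cases hp <;> (rw [List.cons_prefix_cons] at hs; rcases hs with ⟨rfl, -⟩; decide)

-- no word is a prefix of another, so at most one word matches at a position
theorem pvWords_noPrefix :
    ∀ p ∈ PySem.List.enumerate pvWords 0, ∀ q ∈ PySem.List.enumerate pvWords 0,
      p.2 <+: q.2 → p = q := by decide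

theorem pvWords_nodup : (PySem.List.enumerate pvWords 0).Nodup := by decide

theorem pvMatched_small (s : List Char) :
    pvMatched s = [] ∨ ∃ a ∈ PySem.List.enumerate pvWords 0, pvMatched s = [a] := by
  cases hm : pvMatched s with
  | nil => exact Or.inl rfl
  | cons a rest =>
    have hsub : ∀ b ∈ pvMatched s, b ∈ PySem.List.enumerate pvWords 0 ∧ b.2 <+: s := by
      intro b hb
      unfold pvMatched at hb
      refine ⟨List.mem_of_mem_filter hb, ?_⟩
      have := List.of_mem_filter hb
      simpa [PySem.Chars.startswith_iff] using this
    have hnd : (pvMatched s).Nodup := List.Nodup.filter _ pvWords_nodup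
    have ha : a ∈ pvMatched s := by rw [hm]; exact List.mem_cons_self ..
    have hrest : rest = [] := by
      rw [List.eq_nil_iff_forall_not_mem]
      intro b hb
      have hbm : b ∈ pvMatched s := by rw [hm]; exact List.mem_cons_of_mem _ hb
      obtain ⟨hbE, hbp⟩ := hsub b hbm
      obtain ⟨haE, hap⟩ := hsub a ha
      have : a = b := by
        rcases List.prefix_or_prefix_of_prefix hap hbp with h | h
        · exact pvWords_noPrefix a haE b hbE h
        · exact (pvWords_noPrefix b hbE a haE h).symm
      rw [hm] at hnd
      exact (List.nodup_cons.1 hnd).1 (this ▸ hb)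
    exact Or.inr ⟨a, (hsub a ha).1, by simp [hrest]⟩

-- first-match search = head of the filtered stream
theorem pvFindSome_if {α β : Type} (l : List α) (p : α → Bool) (g : α → β) :
    l.findSome? (fun x => if p x then some (g x) else none) = ((l.filter p).head?).map g := by
  induction l with
  | nil => rfl
  | cons x xs ih => by_cases h : p x <;> simp [h, ih]

-- findSome? only looks at the values on the list
theorem pvFindSome_congr {α β : Type} (l : List α) (f g : α → Option β)
    (h : ∀ x ∈ l, f x = g x) : l.findSome? f = l.findSome? g := by
  induction l with
  | nil => rfl
  | cons x xs ih =>
    simp only [List.findSome?_cons, h x (List.mem_cons_self ..)]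
    cases g x <;> simp [ih (fun y hy => h y (List.mem_cons_of_mem _ hy))]

theorem pvDig_filterMap (l : List Char) :
    l.filterMap pvDigVal = (l.filter PySem.Chars.isdigit).map (fun c => ((c.toNat : Int) - 48)) := by
  induction l with
  | nil => rfl
  | cons c cs ih =>
    simp only [pvDigVal] at ih ⊢
    by_cases h : PySem.Chars.isdigit c <;> simp [h, ih]

theorem pvRev_range (n : Nat) :
    (List.range n).reverse = (List.range n).map (fun j => n - 1 - j) := by
  apply List.ext_getElem <;> simp

-- what B's _token_at computes at an in-range position
theorem pvTokAt_at (full : List Char) (k : Nat) (c : Char) (cs : List Char)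
    (h : full.drop k = c :: cs) :
    pvTokenAt full (k : Int)
      = if PySem.Chars.isdigit c then some ((c.toNat : Int) - 48)
        else ((pvMatched (c :: cs)).head?).map (fun dv => dv.1 + 1) := by
  have hget : full[k]? = some c := by
    have := congrArg (fun l => l[0]?) h
    simpa [List.getElem?_drop] using this
  simp only [pvTokenAt, PySem.List.pyGet?_natCast, hget, Int.toNat_natCast, h]
  by_cases hd : PySem.Chars.isdigit c
  · simp [hd]
  · simp only [hd, Bool.false_eq_true, if_false]
    exact pvFindSome_if _ _ _

theorem pvGet_zero {α : Type} (d : List α) (h : d ≠ []) : PySem.List.pyGet? d 0 = d.head? := by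
  cases d with
  | nil => simp at h
  | cons x xs => simp [PySem.List.pyGet?, PySem.List.pyIdx?]

theorem pvGet_neg_one {α : Type} (d : List α) (h : d ≠ []) : PySem.List.pyGet? d (-1) = d.getLast? := by
  have hlen : 0 < d.length := List.length_pos_iff.2 h
  simp only [PySem.List.pyGet?, PySem.List.pyIdx?]
  rw [if_neg (by omega), if_pos (by omega)]
  simp
  rw [List.getLast?_eq_getElem?]

theorem ofChars_two (a b : Char) (ha : PySem.Chars.isdigit a = true) (hb : PySem.Chars.isdigit b = true) :
    PySem.Int.ofChars? [a, b] = some (10 * ((a.toNat : Int) - 48) + ((b.toNat : Int) - 48)) := by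
  simp only [PySem.Chars.isdigit, Bool.and_eq_true, decide_eq_true_eq, Char.le_def] at ha hb
  obtain ⟨ha1, ha2⟩ := ha
  obtain ⟨hb1, hb2⟩ := hb
  have ea : a = Char.ofNat a.toNat := (Char.ofNat_toNat a).symm
  have eb : b = Char.ofNat b.toNat := (Char.ofNat_toNat b).symm
  have ha1' : 48 ≤ a.toNat := ha1
  have ha2' : a.toNat ≤ 57 := ha2
  have hb1' : 48 ≤ b.toNat := hb1
  have hb2' : b.toNat ≤ 57 := hb2
  rw [ea, eb]
  interval_cases (a.toNat) <;> interval_cases (b.toNat) <;> decide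

-- int(d[0] + d[-1]) for a nonempty good list = 10*first + last of its value stream
theorem pvVal_eq (d : List (List Char)) (hne : d ≠ []) (hg : pvGood d) :
    (PySem.Int.ofChars? ((PySem.List.pyGet? d 0).getD [] ++ (PySem.List.pyGet? d (-1)).getD [])).getD 0
      = 10 * ((d.map pvChv).head?.getD 0) + ((d.map pvChv).getLast?.getD 0) := by
  obtain ⟨c0, hc0, hc0d⟩ := hg (d.head hne) (List.head_mem hne)
  obtain ⟨cl, hcl, hcld⟩ := hg (d.getLast hne) (List.getLast_mem hne)
  rw [pvGet_zero d hne, pvGet_neg_one d hne,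
      List.head?_eq_some_head hne, List.getLast?_eq_some_getLast hne]
  simp only [Option.getD_some, hc0, hcl]
  rw [List.singleton_append, ofChars_two c0 cl hc0d hcld]
  have hne' : d.map pvChv ≠ [] := by simpa using hne
  rw [List.head?_eq_some_head hne', List.getLast?_eq_some_getLast hne',
      List.head_map, List.getLast_map, hc0, hcl]
  simp [pvChv]

-- A's per-character loop: p1_digits = the digit chars, p2_digits' values = the token stream
theorem pvCharFoldA (full : List Char) :
    ∀ (cs : List Char) (k : Nat), full.drop k = cs →
    ∀ (d1 d2 : List (List Char)), pvGood d2 →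
    ((PySem.List.enumerate cs (k : Int)).foldl (pvStepA full) (d1, d2)).1
        = d1 ++ (cs.filter PySem.Chars.isdigit).map (fun c => [c])
    ∧ (((PySem.List.enumerate cs (k : Int)).foldl (pvStepA full) (d1, d2)).2).map pvChv
        = d2.map pvChv ++ (List.range cs.length).filterMap (fun j => pvTokenAt full ((k + j : Nat) : Int))
    ∧ pvGood ((PySem.List.enumerate cs (k : Int)).foldl (pvStepA full) (d1, d2)).2 := by
  intro cs
  induction cs with
  | nil =>
    intro k h d1 d2 hg
    simp [PySem.List.enumerate_nil, hg]
  | cons c cs ih =>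
    intro k h d1 d2 hg
    have hdrop1 : full.drop (k + 1) = cs := by
      have := congrArg List.tail h
      simpa [List.tail_drop] using this
    have htok := pvTokAt_at full k c cs h
    rw [PySem.List.enumerate_cons]
    simp only [List.foldl_cons]
    have hcast : (k : Int) + 1 = ((k + 1 : Nat) : Int) := by push_cast; ring
    have hrange : (List.range (cs.length + 1)).filterMap (fun j => pvTokenAt full ((k + j : Nat) : Int))
        = (pvTokenAt full (k : Int)).toList
          ++ (List.range cs.length).filterMap (fun j => pvTokenAt full (((k + 1) + j : Nat) : Int)) := by
      rw [List.range_succ_eq_map, List.filterMap_cons, List.filterMap_map]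
      simp only [Nat.add_zero, Function.comp, Nat.add_succ, Nat.succ_add]
      cases pvTokenAt full (k : Int) <;> simp
    by_cases hd : PySem.Chars.isdigit c
    · -- digit: A appends [c] to both lists; no word matches here
      have hA : pvStepA full (d1, d2) ((k : Int), c)
          = (d1 ++ [[c]],
             (PySem.List.enumerate pvWords 0).foldl
               (fun d dv => if PySem.Chars.startswith (c :: cs) dv.2
                 then d ++ [PySem.Int.toChars (dv.1 + 1)] else d) (d2 ++ [[c]])) := by
        simp [pvStepA, hd, h]
      have hnomatch : pvMatched (c :: cs) = [] := by
        rw [pvMatched, List.filter_eq_nil_iff]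
        intro dv hdv hsw
        exact absurd (pvWords_head dv hdv c cs (by simpa using hsw)) (by simp [hd])
      have hfold : (PySem.List.enumerate pvWords 0).foldl
            (fun d dv => if PySem.Chars.startswith (c :: cs) dv.2
              then d ++ [PySem.Int.toChars (dv.1 + 1)] else d) (d2 ++ [[c]])
          = d2 ++ [[c]] := by
        rw [PySem.List.foldl_append_if]
        have : (PySem.List.enumerate pvWords 0).filter (fun dv => PySem.Chars.startswith (c :: cs) dv.2)
            = pvMatched (c :: cs) := rfl
        rw [this, hnomatch]
        simp
      rw [hA, hfold, hcast]
      obtain ⟨a1, a2, a3⟩ := ih (k + 1) hdrop1 (d1 ++ [[c]]) (d2 ++ [[c]]) (pvGood_append d2 c hg hd)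
      refine ⟨?_, ?_, a3⟩
      · rw [a1, List.filter_cons_of_pos hd]
        simp
      · rw [a2, List.length_cons, hrange, htok]
        simp [hd, pvChv]
    · -- not a digit: A appends the (at most one) matching word token
      have hA : pvStepA full (d1, d2) ((k : Int), c)
          = (d1,
             (PySem.List.enumerate pvWords 0).foldl
               (fun d dv => if PySem.Chars.startswith (c :: cs) dv.2
                 then d ++ [PySem.Int.toChars (dv.1 + 1)] else d) d2) := by
        simp [pvStepA, hd, h]
      have hfold : (PySem.List.enumerate pvWords 0).foldl
            (fun d dv => if PySem.Chars.startswith (c :: cs) dv.2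
              then d ++ [PySem.Int.toChars (dv.1 + 1)] else d) d2
          = d2 ++ (pvMatched (c :: cs)).map (fun dv => PySem.Int.toChars (dv.1 + 1)) := by
        rw [PySem.List.foldl_append_if]; rfl
      have hMgood : pvGood (d2 ++ (pvMatched (c :: cs)).map (fun dv => PySem.Int.toChars (dv.1 + 1))) := by
        intro x hx
        rcases List.mem_append.1 hx with hx | hx
        · exact hg x hx
        · obtain ⟨dv, hdv, rfl⟩ := List.mem_map.1 hx
          obtain ⟨c', e1, e2, _⟩ := pvWords_tokens dv (List.mem_of_mem_filter hdv)
          exact ⟨c', e1, e2⟩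
      rw [hA, hfold, hcast]
      obtain ⟨a1, a2, a3⟩ := ih (k + 1) hdrop1 d1 _ hMgood
      refine ⟨?_, ?_, a3⟩
      · rw [a1, List.filter_cons_of_neg (by simp [hd])]
      · rw [a2, List.length_cons, hrange, htok]
        simp only [hd, Bool.false_eq_true, if_false, List.map_append, List.map_map]
        have hMv : (pvMatched (c :: cs)).map (pvChv ∘ fun dv => PySem.Int.toChars (dv.1 + 1))
            = ((pvMatched (c :: cs)).head?.map (fun dv => dv.1 + 1)).toList := by
          rcases pvMatched_small (c :: cs) with hm | ⟨a, haE, hm⟩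
          · simp [hm]
          · obtain ⟨c', e1, e2, e3⟩ := pvWords_tokens a haE
            simp [hm, Function.comp, e1, pvChv, e3]
        rw [hMv]
        simp

-- per-line equality: A's collect-then-index equals B's four searches, given a digit exists
theorem pvLine_eq (line : List Char) (h : ∃ c ∈ line, PySem.Chars.isdigit c = true) :
    pvLineA line = pvLineB line := by
  obtain ⟨e1, e2, e3⟩ := pvCharFoldA line line 0 (by simp) [] []
    (by intro x hx; simp at hx)
  simp only [Nat.cast_zero, List.map_nil, List.nil_append, Nat.zero_add] at e1 e2 e3
  have htoks : (((PySem.List.enumerate line 0).foldl (pvStepA line) ([], [])).2).map pvChv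
      = pvToks line := by
    rw [e2]; rfl
  -- a digit exists, hence a token exists
  obtain ⟨c, hc, hcd⟩ := h
  obtain ⟨j, hj, hjc⟩ := List.mem_iff_getElem.1 hc
  have hdropj : line.drop j = c :: line.drop (j + 1) := by
    rw [List.drop_eq_getElem_cons hj, hjc]
  have hts : pvTokenAt line (j : Int) = some ((c.toNat : Int) - 48) := by
    rw [pvTokAt_at line j c _ hdropj]; simp [hcd]
  have htne : pvToks line ≠ [] := by
    intro hemp
    simp only [pvToks] at hemp
    have := List.filterMap_eq_nil_iff.1 hemp j (List.mem_range.2 hj)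
    rw [hts] at this
    exact Option.some_ne_none _ this
  have hne2 : ((PySem.List.enumerate line 0).foldl (pvStepA line) ([], [])).2 ≠ [] := by
    intro hemp
    rw [hemp] at htoks
    exact htne htoks.symm
  have hfne : line.filter PySem.Chars.isdigit ≠ [] := by
    intro hemp
    exact List.filter_eq_nil_iff.1 hemp c hc hcd
  have hne1 : ((PySem.List.enumerate line 0).foldl (pvStepA line) ([], [])).1 ≠ [] := by
    rw [e1]
    simpa using hfne
  have hg1 : pvGood ((PySem.List.enumerate line 0).foldl (pvStepA line) ([], [])).1 := by
    rw [e1]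
    intro x hx
    obtain ⟨c', hc', rfl⟩ := List.mem_map.1 hx
    exact ⟨c', rfl, List.of_mem_filter hc'⟩
  -- A's p1_digits value stream is the digit stream
  have hd1 : (((PySem.List.enumerate line 0).foldl (pvStepA line) ([], [])).1).map pvChv
      = (line.filter PySem.Chars.isdigit).map (fun c => ((c.toNat : Int) - 48)) := by
    rw [e1, List.map_map]
    exact List.map_congr_left (fun c' _ => by simp [pvChv])
  -- B's digit searches
  have hb1 : line.findSome? pvDigVal
      = ((line.filter PySem.Chars.isdigit).map (fun c => ((c.toNat : Int) - 48))).head? := by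
    rw [← pvDig_filterMap]
    exact List.head?_filterMap.symm
  have hb2 : line.reverse.findSome? pvDigVal
      = ((line.filter PySem.Chars.isdigit).map (fun c => ((c.toNat : Int) - 48))).getLast? := by
    rw [← pvDig_filterMap, ← List.head?_filterMap, List.filterMap_reverse, List.head?_reverse]
  -- B's token searches
  have hhead : (pvToks line).head?
      = (List.range line.length).findSome? (fun j : Nat => pvTokenAt line (j : Int)) :=
    List.head?_filterMap
  have hlast : (pvToks line).getLast?
      = ((List.range line.length).reverse).findSome? (fun j : Nat => pvTokenAt line (j : Int)) := by
    rw [← List.head?_reverse, pvToks, ← List.filterMap_reverse, List.head?_filterMap]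
  have hb3 : (PySem.List.pyRange 0 (line.length : Int) 1).findSome? (fun i => pvTokenAt line i)
      = (pvToks line).head? := by
    rw [PySem.List.pyRange_one, List.findSome?_map]
    simp only [Int.sub_zero, Int.toNat_natCast]
    rw [hhead]
    exact pvFindSome_congr _ _ _ (fun j _ => by simp [Function.comp])
  have hb4 : (PySem.List.pyRange 0 (line.length : Int) 1).findSome?
        (fun i => pvTokenAt line ((line.length : Int) - 1 - i))
      = (pvToks line).getLast? := by
    rw [PySem.List.pyRange_one, List.findSome?_map]
    simp only [Int.sub_zero, Int.toNat_natCast]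
    rw [hlast, pvRev_range, List.findSome?_map]
    apply pvFindSome_congr
    intro k hk
    have hk' := List.mem_range.1 hk
    simp only [Function.comp]
    congr 1
    omega
  -- assemble both components
  simp only [pvLineA, pvLineB]
  rw [pvVal_eq _ hne1 hg1, pvVal_eq _ hne2 e3, hd1, htoks, hb1, hb2, hb3, hb4]

-- ===== VERDICT (by name: the statement is the Claim_ definition above) =====
theorem parse_py_spec : Claim_equal_parse_py := by
  intro s _ hpre
  unfold Spec_parse_py
  simp only [parse_py, parse_py_alt]
  rw [PySem.List.foldl_prod_mk (fun (a : List Int) (line : String) => a ++ [(pvLineA line.toList).1])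
        (fun (a : List Int) (line : String) => a ++ [(pvLineA line.toList).2]),
      PySem.List.foldl_prod_mk (fun (a : List Int) (line : String) => a ++ [(pvLineB line.toList).1])
        (fun (a : List Int) (line : String) => a ++ [(pvLineB line.toList).2])]
  rw [PySem.List.foldl_append_singleton_eq_map, PySem.List.foldl_append_singleton_eq_map,
      PySem.List.foldl_append_singleton_eq_map, PySem.List.foldl_append_singleton_eq_map]
  simp only [List.nil_append, Prod.mk.injEq]
  constructor <;>
  · apply List.map_congr_left
    intro line hline
    have := pvLine_eq line.toList (by simpa using List.any_eq_true.mp (hpre line hline))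
    simp [this]
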